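-- pv_equiv track=rewrite | github.com/bjmedina/memory | utls/runners_utils.py | isi_split_indices
-- ===== SOURCE A (Python) =====
-- def isi_split_indices(isis, t_step):
--     """
--     Given ISIs and a t_step, return index ranges for early and late regimes.
--
--     Returns:
--         early_end_idx : int  (exclusive)
--         late_start_idx : int (inclusive)
--     """
--     early_idxs = [i for i, isi in enumerate(isis) if isi < t_step]
--     late_idxs  = [i for i, isi in enumerate(isis) if isi >= t_step]
--
--     if len(early_idxs) == 0:
--         early_end = 0
--     else:
--         early_end = max(early_idxs) + 1
--
--     if len(late_idxs) == 0:
--         late_start = len(isis)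
--     else:
--         late_start = min(late_idxs)
--
--     return early_end, late_start
-- ===== SOURCE B (Python) =====
-- def isi_split_indices(isis, t_step):
--     """One forward pass keeping two running scalars instead of
--     building index lists and reducing with max/min."""
--     early_end = 0
--     late_start = len(isis)
--     found_late = False
--     for i, isi in enumerate(isis):
--         if isi < t_step:
--             early_end = i + 1
--         elif not found_late:
--             late_start = i
--             found_late = True
--     return early_end, late_start
-- ===== Notes on version B (the rewrite author's own statement) =====
-- stated objective: simpler
-- what changed: Replaces the two enumerate-comprehensions plus max()/min() reductions by a single forward pass that maintains two running scalars (overwritten last-early-index+1, first-late-index guarded by a found flag).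
import Mathlib
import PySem

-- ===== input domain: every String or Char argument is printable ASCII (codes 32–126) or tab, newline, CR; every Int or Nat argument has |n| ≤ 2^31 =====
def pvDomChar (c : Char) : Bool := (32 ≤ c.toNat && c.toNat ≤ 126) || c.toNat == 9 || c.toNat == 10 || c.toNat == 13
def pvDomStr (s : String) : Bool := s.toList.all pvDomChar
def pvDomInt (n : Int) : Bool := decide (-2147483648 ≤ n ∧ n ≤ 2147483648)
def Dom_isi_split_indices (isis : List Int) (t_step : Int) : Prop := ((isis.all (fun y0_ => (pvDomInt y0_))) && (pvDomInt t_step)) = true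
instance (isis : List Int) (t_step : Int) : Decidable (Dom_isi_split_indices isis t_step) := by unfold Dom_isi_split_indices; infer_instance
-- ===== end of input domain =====

-- B replaces A's two index-list comprehensions plus max()/min() reductions by one
-- forward pass over enumerate(isis) maintaining two running scalars (objective: simpler).

-- ===== PORT A =====
def isi_split_indices (isis : List Int) (t_step : Int) : Int × Int :=
  let early_idxs := ((PySem.List.enumerate isis 0).filter (fun p => decide (p.2 < t_step))).map (fun p => p.1)
  let late_idxs  := ((PySem.List.enumerate isis 0).filter (fun p => decide (t_step ≤ p.2))).map (fun p => p.1)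
  -- 'if len(early_idxs) == 0' ported as the none-case of max?/min? (none exactly on [])
  let early_end : Int :=
    match PySem.List.max? early_idxs (fun y => y) with
    | none => 0
    | some m => m + 1
  let late_start : Int :=
    match PySem.List.min? late_idxs (fun y => y) with
    | none => (isis.length : Int)
    | some m => m
  (early_end, late_start)

-- ===== PORT B =====
-- loop body of Source B: state (early_end, late_start, found_late)
def bStep (t_step : Int) (st : Int × Int × Bool) (p : Int × Int) : Int × Int × Bool :=
  if p.2 < t_step then (p.1 + 1, st.2.1, st.2.2)
  else if st.2.2 = false then (st.1, p.1, true)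
  else st

def isi_split_indices_alt (isis : List Int) (t_step : Int) : Int × Int :=
  let r := (PySem.List.enumerate isis 0).foldl (bStep t_step) (0, (isis.length : Int), false)
  (r.1, r.2.1)

-- ===== PRECONDITION & SPEC =====
def Spec_isi_split_indices (isis : List Int) (t_step : Int) (out : Int × Int) : Prop := out = isi_split_indices_alt isis t_step
instance (isis : List Int) (t_step : Int) (out : Int × Int) : Decidable (Spec_isi_split_indices isis t_step out) := by unfold Spec_isi_split_indices; infer_instance

-- ===== CLAIM (what is proved, stated in full; the proofs are below) =====
def Claim_equal_isi_split_indices : Prop := ∀ (isis : List Int) (t_step : Int), Dom_isi_split_indices isis t_step → Spec_isi_split_indices isis t_step (isi_split_indices isis t_step)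

-- ===== LEMMAS AND PROOFS =====

-- last index (from offset s) whose element is < t, none if there is none
def lastE (t : Int) : List Int → Int → Option Int
  | [], _ => none
  | x :: xs, s =>
    match lastE t xs (s + 1) with
    | some m => some m
    | none => if x < t then some s else none

-- first index (from offset s) whose element is ≥ t, none if there is none
def firstL (t : Int) : List Int → Int → Option Int
  | [], _ => none
  | x :: xs, s => if x < t then firstL t xs (s + 1) else some s

lemma mem_idx_ge (xs : List Int) (s : Int) (q : Int × Int → Bool) :
    ∀ j ∈ ((PySem.List.enumerate xs s).filter q).map (fun p => p.1), s ≤ j := by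
  intro j hj
  simp only [List.mem_map, List.mem_filter] at hj
  obtain ⟨p, ⟨hp, _⟩, rfl⟩ := hj
  obtain ⟨k, hk, rfl⟩ := (PySem.List.mem_enumerate_iff _ _ _).1 hp
  simp

lemma max?_cons_of_lt (a : Int) (L : List Int) (hL : L ≠ []) (h : ∀ y ∈ L, a < y) :
    PySem.List.max? (a :: L) (fun y => y) = PySem.List.max? L (fun y => y) := by
  cases L with
  | nil => exact absurd rfl hL
  | cons b L' =>
    rw [PySem.List.max?_id_cons, PySem.List.max?_id_cons, List.foldl_cons,
      max_eq_right (le_of_lt (h b (by simp)))]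

lemma foldl_min_of_le (L : List Int) (a : Int) (h : ∀ y ∈ L, a ≤ y) : L.foldl min a = a := by
  induction L generalizing a with
  | nil => rfl
  | cons b L ih =>
    rw [List.foldl_cons, min_eq_left (h b (by simp))]
    exact ih a (fun y hy => h y (List.mem_cons_of_mem _ hy))

lemma min?_cons_of_le (a : Int) (L : List Int) (h : ∀ y ∈ L, a ≤ y) :
    PySem.List.min? (a :: L) (fun y => y) = some a := by
  rw [PySem.List.min?_id_cons, foldl_min_of_le L a h]

-- A's max(early_idxs) computes lastE
lemma maxE_eq (t : Int) (xs : List Int) : ∀ s : Int,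
    PySem.List.max? (((PySem.List.enumerate xs s).filter (fun p => decide (p.2 < t))).map (fun p => p.1)) (fun y => y)
      = lastE t xs s := by
  induction xs with
  | nil => intro s; simp [PySem.List.enumerate_nil, lastE, PySem.List.max?]
  | cons x xs ih =>
    intro s
    rw [PySem.List.enumerate_cons, List.filter_cons]
    by_cases hx : x < t
    · simp only [hx, decide_true, if_true, List.map_cons]
      rcases hR : ((PySem.List.enumerate xs (s + 1)).filter (fun p => decide (p.2 < t))).map (fun p => p.1) with _ | ⟨b, L⟩ <;> rw [hR]
      · have hnone : lastE t xs (s + 1) = none := by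
          rw [← ih (s + 1), hR]; simp [PySem.List.max?]
        simp [lastE, hnone, hx, PySem.List.max?_id_cons]
      · have hgt : ∀ y ∈ b :: L, s < y := by
          intro y hy
          have := mem_idx_ge xs (s + 1) (fun p => decide (p.2 < t)) y (by rw [hR]; exact hy)
          omega
        rw [max?_cons_of_lt s (b :: L) (by simp) hgt, ← hR, ih (s + 1)]

        cases hlast : lastE t xs (s + 1) with
        | none =>
          exfalso
          rw [← ih (s + 1), hR] at hlast
          simp [PySem.List.max?_id_cons] at hlast
        | some m => simp [lastE, hlast]
    · simp only [hx, decide_false, Bool.false_eq_true, if_false]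
      rw [ih (s + 1)]
      cases hlast : lastE t xs (s + 1) <;> simp [lastE, hlast, hx]

-- A's min(late_idxs) computes firstL
lemma minL_eq (t : Int) (xs : List Int) : ∀ s : Int,
    PySem.List.min? (((PySem.List.enumerate xs s).filter (fun p => decide (t ≤ p.2))).map (fun p => p.1)) (fun y => y)
      = firstL t xs s := by
  induction xs with
  | nil => intro s; simp [PySem.List.enumerate_nil, firstL, PySem.List.min?]
  | cons x xs ih =>
    intro s
    rw [PySem.List.enumerate_cons, List.filter_cons]
    by_cases hx : x < t
    · have hd : decide (t ≤ (s, x).2) = false := by simp; omega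
      simp only [hd, Bool.false_eq_true, if_false]
      rw [ih (s + 1)]
      simp [firstL, hx]
    · have hd : decide (t ≤ (s, x).2) = true := by simp; omega
      simp only [hd, if_true, List.map_cons]
      rw [min?_cons_of_le s _ (fun y hy => by
        have := mem_idx_ge xs (s + 1) (fun p => decide (t ≤ p.2)) y hy
        omega)]
      simp [firstL, hx]

-- B's single pass in terms of lastE / firstL, over an arbitrary start state
lemma fold_char (t : Int) (xs : List Int) : ∀ (s e l : Int) (f : Bool),
    (PySem.List.enumerate xs s).foldl (bStep t) (e, l, f) =
    ((match lastE t xs s with | none => e | some m => m + 1),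
     (if f then l else match firstL t xs s with | none => l | some m => m),
     (f || (firstL t xs s).isSome)) := by
  induction xs with
  | nil => intro s e l f; simp [PySem.List.enumerate_nil, lastE, firstL]
  | cons x xs ih =>
    intro s e l f
    rw [PySem.List.enumerate_cons, List.foldl_cons]
    by_cases hx : x < t
    · have hb : bStep t (e, l, f) (s, x) = (s + 1, l, f) := by simp [bStep, hx]
      rw [hb, ih (s + 1)]
      cases hlast : lastE t xs (s + 1) <;> simp [lastE, firstL, hlast, hx]
    · cases f with
      | false =>
        have hb : bStep t (e, l, false) (s, x) = (e, s, true) := by simp [bStep, hx]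
        rw [hb, ih (s + 1)]
        cases hlast : lastE t xs (s + 1) <;> simp [lastE, firstL, hlast, hx]
      | true =>
        have hb : bStep t (e, l, true) (s, x) = (e, l, true) := by simp [bStep, hx]
        rw [hb, ih (s + 1)]
        cases hlast : lastE t xs (s + 1) <;> simp [lastE, firstL, hlast, hx]

-- ===== VERDICT (by name: the statement is the Claim_ definition above) =====
theorem isi_split_indices_spec : Claim_equal_isi_split_indices := by
  intro isis t _
  unfold Spec_isi_split_indices isi_split_indices isi_split_indices_alt
  simp [fold_char, maxE_eq, minL_eq]
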